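-- pv_equiv track=rewrite | github.com/stb-tester/stb-tester-test-pack | tests/utils.py | _combine_neighbouring_extents
-- ===== SOURCE A (Python) =====
-- def _combine_neighbouring_extents(extents, distance_px=10):
--     """
--     >>> list(_combine_neighbouring_extents(
--     ...     [(1, 6), (7, 11), (12, 16), (18, 23)],
--     ...     distance_px=1))
--     [(1, 16), (18, 23)]
--     """
--     left, right = extents[0]
--     for x in extents[1:]:
--         if x[0] <= (right + distance_px):
--             right = x[1]
--         else:
--             yield (left, right)
--             left, right = x
--     yield (left, right)
-- ===== SOURCE B (Python) =====
-- def _combine_neighbouring_extents(extents, distance_px=10):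
--     # Partition extents into contiguous runs first (split where the gap
--     # exceeds distance_px), then emit one combined extent per run.
--     runs = [[extents[0]]]
--     for cur, nxt in zip(extents, extents[1:]):
--         if nxt[0] > cur[1] + distance_px:
--             runs.append([nxt])
--         else:
--             runs[-1].append(nxt)
--     for run in runs:
--         yield (run[0][0], run[-1][1])
-- ===== Notes on version B (the rewrite author's own statement) =====
-- stated objective: alternative
-- what changed: Instead of maintaining a running (left,right) pair and flushing on each gap, B first partitions the list into contiguous runs by walking consecutive pairs with zip, then emits (run[0][0], run[-1][1]) for each run.
import Mathlib
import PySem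

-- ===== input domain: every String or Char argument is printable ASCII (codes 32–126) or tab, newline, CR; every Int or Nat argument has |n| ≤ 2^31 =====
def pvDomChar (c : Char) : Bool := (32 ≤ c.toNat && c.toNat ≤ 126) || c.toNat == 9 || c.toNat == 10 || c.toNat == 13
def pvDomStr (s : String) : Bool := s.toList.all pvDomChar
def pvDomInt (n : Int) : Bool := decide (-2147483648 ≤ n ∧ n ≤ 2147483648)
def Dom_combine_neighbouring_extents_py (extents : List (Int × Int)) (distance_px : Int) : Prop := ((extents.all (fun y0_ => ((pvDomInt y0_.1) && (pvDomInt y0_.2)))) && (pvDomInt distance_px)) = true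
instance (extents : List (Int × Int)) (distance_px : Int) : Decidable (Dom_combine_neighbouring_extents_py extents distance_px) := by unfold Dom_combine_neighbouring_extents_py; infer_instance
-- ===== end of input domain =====

-- B replaces A's running (left,right) accumulator with a two-phase pass: partition
-- into contiguous runs first, then emit one extent per run (objective: alternative
-- decomposition, same cost). Both are generators in Python; return value only is compared.

-- ===== PORT A =====
-- A: running (left, right), flush a pair on each gap, final flush at the end.
def combine_neighbouring_extents_py (extents : List (Int × Int)) (distance_px : Int) : List (Int × Int) :=
  match extents with
  | [] => []   -- Python raises IndexError here; excluded by Pre_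
  | e0 :: rest =>
    let st := rest.foldl
      (fun (acc : List (Int × Int) × Int × Int) x =>
        if x.1 ≤ acc.2.2 + distance_px then (acc.1, acc.2.1, x.2)
        else (acc.1 ++ [(acc.2.1, acc.2.2)], x.1, x.2))
      ([], e0.1, e0.2)
    st.1 ++ [(st.2.1, st.2.2)]

-- ===== PORT B =====
-- B: build explicit runs by walking consecutive pairs (zip extents extents[1:]),
-- then map each run to (run[0][0], run[-1][1]).
def combine_neighbouring_extents_py_alt (extents : List (Int × Int)) (distance_px : Int) : List (Int × Int) :=
  match extents with
  | [] => []   -- Python raises IndexError here; excluded by Pre_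
  | e0 :: _ =>
    let runs := (List.zip extents (extents.drop 1)).foldl
      (fun (runs : List (List (Int × Int))) p =>
        if p.2.1 > p.1.2 + distance_px then runs ++ [[p.2]]
        else runs.dropLast ++ [runs.getLastD [] ++ [p.2]])
      [[e0]]
    runs.map (fun run => ((run.headD (0, 0)).1, (run.getLastD (0, 0)).2))

-- ===== PRECONDITION & SPEC =====
-- Pre_ excludes only the empty list, on which the Python A (and B) raises IndexError.
def Pre_combine_neighbouring_extents_py (extents : List (Int × Int)) (distance_px : Int) : Prop := extents ≠ []
instance (extents : List (Int × Int)) (distance_px : Int) : Decidable (Pre_combine_neighbouring_extents_py extents distance_px) := by unfold Pre_combine_neighbouring_extents_py; infer_instance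
def pvWitness_combine_neighbouring_extents_py : (List (Int × Int)) × Int := ([(1, 6), (7, 11), (12, 16), (18, 23)], 1)

def Spec_combine_neighbouring_extents_py (extents : List (Int × Int)) (distance_px : Int) (out : List (Int × Int)) : Prop := out = combine_neighbouring_extents_py_alt extents distance_px
instance (extents : List (Int × Int)) (distance_px : Int) (out : List (Int × Int)) : Decidable (Spec_combine_neighbouring_extents_py extents distance_px out) := by unfold Spec_combine_neighbouring_extents_py; infer_instance

-- ===== CLAIM (what is proved, stated in full; the proofs are below) =====
def Claim_equal_combine_neighbouring_extents_py : Prop := ∀ (extents : List (Int × Int)) (distance_px : Int), Dom_combine_neighbouring_extents_py extents distance_px → Pre_combine_neighbouring_extents_py extents distance_px → Spec_combine_neighbouring_extents_py extents distance_px (combine_neighbouring_extents_py extents distance_px)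

-- ===== LEMMAS AND PROOFS =====

-- Reference recursion: groups (l, r) xs d is the combined-extents list that both
-- ports produce once the first element has been loaded into (l, r).
def pvGroups (d : Int) : Int × Int → List (Int × Int) → List (Int × Int)
  | (l, r), [] => [(l, r)]
  | (l, r), x :: xs =>
    if x.1 ≤ r + d then pvGroups d (l, x.2) xs
    else (l, r) :: pvGroups d (x.1, x.2) xs

-- Reference runs: the run structure B's fold builds after the current run has
-- accumulated `run` and current element `a` (last of the current run).
def pvRuns (d : Int) (run : List (Int × Int)) (a : Int × Int) : List (Int × Int) → List (List (Int × Int))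
  | [] => [run ++ [a]]
  | x :: xs =>
    if x.1 > a.2 + d then (run ++ [a]) :: pvRuns d [] x xs
    else pvRuns d (run ++ [a]) x xs

theorem pvA_foldl (d : Int) (xs : List (Int × Int)) :
    ∀ (out : List (Int × Int)) (l r : Int),
      (let st := xs.foldl
        (fun (acc : List (Int × Int) × Int × Int) x =>
          if x.1 ≤ acc.2.2 + d then (acc.1, acc.2.1, x.2)
          else (acc.1 ++ [(acc.2.1, acc.2.2)], x.1, x.2)) (out, l, r)
       st.1 ++ [(st.2.1, st.2.2)]) = out ++ pvGroups d (l, r) xs := by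
  induction xs with
  | nil => intro out l r; simp [pvGroups]
  | cons x xs ih =>
    intro out l r
    simp only [List.foldl_cons, pvGroups]
    by_cases h : x.1 ≤ r + d
    · simp only [h, if_pos]; exact ih out l x.2
    · simp only [h, if_neg, if_false, ite_false]
      rw [ih (out ++ [(l, r)]) x.1 x.2]
      simp

theorem pvB_foldl (d : Int) (xs : List (Int × Int)) :
    ∀ (pre : List (List (Int × Int))) (run : List (Int × Int)) (a : Int × Int),
      List.foldl
        (fun (runs : List (List (Int × Int))) p =>
          if p.2.1 > p.1.2 + d then runs ++ [[p.2]]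
          else runs.dropLast ++ [runs.getLastD [] ++ [p.2]])
        (pre ++ [run ++ [a]]) (List.zip (a :: xs) xs)
      = pre ++ pvRuns d run a xs := by
  induction xs with
  | nil => intro pre run a; simp [pvRuns]
  | cons x xs ih =>
    intro pre run a
    simp only [List.zip_cons_cons, List.foldl_cons, pvRuns]
    by_cases h : x.1 > a.2 + d
    · simp only [h, if_pos]
      have : (pre ++ [run ++ [a]]) ++ [[x]] = (pre ++ [run ++ [a]]) ++ [[] ++ [x]] := by simp
      rw [this, ih]
      simp [h]
    · simp only [h, if_neg, ite_false]
      rw [List.dropLast_concat, List.getLastD_concat, ih]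

theorem pvRuns_map (d : Int) (xs : List (Int × Int)) :
    ∀ (run : List (Int × Int)) (a : Int × Int),
      (pvRuns d run a xs).map (fun run => ((run.headD (0, 0)).1, (run.getLastD (0, 0)).2))
      = pvGroups d (((run ++ [a]).headD (0, 0)).1, a.2) xs := by
  induction xs with
  | nil =>
    intro run a
    simp [pvRuns, pvGroups, List.getLastD_concat]
  | cons x xs ih =>
    intro run a
    simp only [pvRuns, pvGroups]
    by_cases h : x.1 > a.2 + d
    · have h' : ¬ x.1 ≤ a.2 + d := by omega
      simp only [h, if_pos, h', ite_false, List.map_cons, List.getLastD_concat]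
      rw [ih [] x]
      simp
    · have h' : x.1 ≤ a.2 + d := by omega
      simp only [h, ite_false, h', if_pos]
      rw [ih (run ++ [a]) x]
      cases run <;> simp

-- ===== VERDICT (by name: the statement is the Claim_ definition above) =====
theorem combine_neighbouring_extents_py_spec : Claim_equal_combine_neighbouring_extents_py := by
  intro extents d _ hpre
  unfold Spec_combine_neighbouring_extents_py
  match extents with
  | [] => exact absurd rfl hpre
  | e0 :: rest =>
    show combine_neighbouring_extents_py (e0 :: rest) d = combine_neighbouring_extents_py_alt (e0 :: rest) d
    unfold combine_neighbouring_extents_py combine_neighbouring_extents_py_alt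
    simp only [List.drop_succ_cons, List.drop_zero]
    rw [pvA_foldl d rest [] e0.1 e0.2]
    have h0 : ([[e0]] : List (List (Int × Int))) = [] ++ [([] : List (Int × Int)) ++ [e0]] := by simp
    rw [h0, pvB_foldl d rest [] [] e0]
    simp only [List.nil_append]
    rw [pvRuns_map d rest [] e0]
    simp
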